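-- pv_equiv track=rewrite | github.com/TIdoWilson/AUTOMACAO | Conversor de PDF Cartão de Horas para TXT + Conversor para IOB/extrair_cartoes_para_excel.py | normalizar_eventos_iob
-- ===== SOURCE A (Python) =====
-- EVENTOS_IOB = {
--     "geral_horas_normais": 0,
--     "geral_extra_50": 0,
--     "geral_extra_100": 0,
--     "geral_extra_diurna": 0,
--     "geral_extra_noturna": 0,
--     "geral_adicional_noturno": 0,
--     "geral_hora_noturna_reduzida": 0,
--     "geral_falta_atraso": 0,
-- }
--
-- def normalizar_eventos_iob(eventos_iob: dict[str, int] | None = None) -> dict[str, int]: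
--     base = dict(EVENTOS_IOB)
--     if not eventos_iob:
--         return base
--     for chave, valor in eventos_iob.items():
--         if chave not in base:
--             continue
--         try:
--             base[chave] = int(valor)
--         except (TypeError, ValueError):
--             continue
--     return base
-- ===== SOURCE B (Python) =====
-- EVENTOS_IOB = {
--     "geral_horas_normais": 0,
--     "geral_extra_50": 0,
--     "geral_extra_100": 0,
--     "geral_extra_diurna": 0,
--     "geral_extra_noturna": 0,
--     "geral_adicional_noturno": 0,
--     "geral_hora_noturna_reduzida": 0,
--     "geral_falta_atraso": 0,
-- }
--
-- def _resolver(src, chave, padrao):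
--     """Value for one schema key: the caller's value coerced to int, or the default."""
--     if chave not in src:
--         return padrao
--     try:
--         return int(src[chave])
--     except (TypeError, ValueError):
--         return padrao
--
-- def _construir(src, itens):
--     """Recursively assemble the (key, value) pairs for the remaining schema items."""
--     if not itens:
--         return []
--     (chave, padrao) = itens[0]
--     return [(chave, _resolver(src, chave, padrao))] + _construir(src, itens[1:])
--
-- def normalizar_eventos_iob(eventos_iob: dict[str, int] | None = None) -> dict[str, int]:
--     src = eventos_iob if eventos_iob else {}
--     return dict(_construir(src, list(EVENTOS_IOB.items())))
-- ===== Notes on version B (the rewrite author's own statement) =====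
-- stated objective: alternative
-- what changed: B builds a fresh result by structural recursion over the fixed schema items (pure cons-up construction, no mutable base dict), resolving each key's value from the caller's dict, instead of A's copy-the-defaults-then-mutate loop over the input's items.
import Mathlib
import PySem

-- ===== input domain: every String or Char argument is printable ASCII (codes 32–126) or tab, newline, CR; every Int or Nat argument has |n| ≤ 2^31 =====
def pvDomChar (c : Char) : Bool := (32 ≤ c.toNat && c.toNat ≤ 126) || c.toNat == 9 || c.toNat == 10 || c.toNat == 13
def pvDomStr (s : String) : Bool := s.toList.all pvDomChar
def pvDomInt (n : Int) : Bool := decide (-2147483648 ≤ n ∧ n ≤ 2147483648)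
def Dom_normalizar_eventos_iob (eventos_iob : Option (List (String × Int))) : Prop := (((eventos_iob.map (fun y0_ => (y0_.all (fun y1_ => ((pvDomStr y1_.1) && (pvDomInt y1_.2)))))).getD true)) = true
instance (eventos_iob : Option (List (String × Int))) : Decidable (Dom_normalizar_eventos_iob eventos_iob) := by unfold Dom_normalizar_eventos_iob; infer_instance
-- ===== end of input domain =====

-- B builds a fresh result by structural recursion over the fixed schema items
-- (pure cons-up construction, no mutable base dict), instead of A's
-- copy-the-defaults-then-mutate loop over the input's items.
-- (Values are ints on the admitted inputs, so Python's int(valor) is the identity.)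

-- the module constant EVENTOS_IOB, as an association list in insertion order
def pvEventosIOB : List (String × Int) :=
  [("geral_horas_normais", 0), ("geral_extra_50", 0), ("geral_extra_100", 0),
   ("geral_extra_diurna", 0), ("geral_extra_noturna", 0), ("geral_adicional_noturno", 0),
   ("geral_hora_noturna_reduzida", 0), ("geral_falta_atraso", 0)]

-- ===== PORT A =====
-- one step of A's loop body: `if chave not in base: continue; base[chave] = int(valor)`
def pvUpdA (b : List (String × Int)) (p : String × Int) : List (String × Int) :=
  if b.any (fun q => q.1 == p.1) then
    b.map (fun q => if q.1 == p.1 then (q.1, p.2) else q)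
  else b

def normalizar_eventos_iob (eventos_iob : Option (List (String × Int))) : List (String × Int) :=
  let base := pvEventosIOB
  match eventos_iob with
  | none => base
  | some xs => if xs.isEmpty then base else xs.foldl pvUpdA base

-- ===== PORT B =====
-- _resolver: the caller's value for one schema key (int() is the identity here), or the default
def pvResolver (src : List (String × Int)) (chave : String) (padrao : Int) : Int :=
  match src.lookup chave with
  | some v => v
  | none => padrao

-- _construir: recursively assemble the pairs for the remaining schema items
def pvConstruir (src : List (String × Int)) : List (String × Int) → List (String × Int)
  | [] => []
  | (chave, padrao) :: itens => (chave, pvResolver src chave padrao) :: pvConstruir src itens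

def normalizar_eventos_iob_alt (eventos_iob : Option (List (String × Int))) : List (String × Int) :=
  let src := match eventos_iob with
             | none => []
             | some xs => if xs.isEmpty then [] else xs
  pvConstruir src pvEventosIOB

-- ===== PRECONDITION & SPEC =====
-- Pre_ excludes association lists with duplicate keys: those cannot arise from a Python
-- dict (the function's declared argument type), so no input A accepts is excluded.
def Pre_normalizar_eventos_iob (eventos_iob : Option (List (String × Int))) : Prop :=
  ((eventos_iob.getD []).map Prod.fst).Nodup
instance (eventos_iob : Option (List (String × Int))) : Decidable (Pre_normalizar_eventos_iob eventos_iob) := by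
  unfold Pre_normalizar_eventos_iob; infer_instance

def pvWitness_normalizar_eventos_iob : (Option (List (String × Int))) :=
  some [("geral_extra_50", 7), ("foo", 3)]

def Spec_normalizar_eventos_iob (eventos_iob : Option (List (String × Int))) (out : List (String × Int)) : Prop := out = normalizar_eventos_iob_alt eventos_iob
instance (eventos_iob : Option (List (String × Int))) (out : List (String × Int)) : Decidable (Spec_normalizar_eventos_iob eventos_iob out) := by unfold Spec_normalizar_eventos_iob; infer_instance

-- ===== CLAIM (what is proved, stated in full; the proofs are below) =====
def Claim_equal_normalizar_eventos_iob : Prop := ∀ (eventos_iob : Option (List (String × Int))), Dom_normalizar_eventos_iob eventos_iob → Pre_normalizar_eventos_iob eventos_iob → Spec_normalizar_eventos_iob eventos_iob (normalizar_eventos_iob eventos_iob)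

-- ===== LEMMAS AND PROOFS =====

theorem pv_lookup_eq_none {xs : List (String × Int)} {k : String}
    (h : k ∉ xs.map Prod.fst) : xs.lookup k = none := by
  induction xs with
  | nil => rfl
  | cons p t ih =>
    simp only [List.map_cons, List.mem_cons, not_or] at h
    have hb : (k == p.1) = false := by simpa using h.1
    simp [List.lookup, hb, ih h.2]

-- B's recursive builder is pointwise substitution over the schema list
theorem pv_construir_eq_map (src : List (String × Int)) (b : List (String × Int)) :
    pvConstruir src b = b.map (fun q => (q.1, pvResolver src q.1 q.2)) := by
  induction b with
  | nil => rfl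
  | cons p t ih => cases p; simp [pvConstruir, ih]

-- A's fold over the input equals B's pointwise substitution when the input keys are distinct
theorem pv_foldl_updA (xs : List (String × Int)) (b : List (String × Int))
    (h : (xs.map Prod.fst).Nodup) :
    xs.foldl pvUpdA b = b.map (fun q => (q.1, pvResolver xs q.1 q.2)) := by
  induction xs generalizing b with
  | nil =>
    have : (fun q : String × Int => (q.1, pvResolver [] q.1 q.2)) = id :=
      funext fun q => rfl
    rw [this, List.map_id]; rfl
  | cons p t ih =>
    simp only [List.map_cons, List.nodup_cons] at h
    obtain ⟨hk, ht⟩ := h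
    simp only [List.foldl_cons]
    rw [ih _ ht]
    by_cases hin : b.any (fun q => q.1 == p.1)
    · rw [pvUpdA, if_pos hin, List.map_map]
      apply List.map_congr_left
      intro q _
      by_cases hq : q.1 = p.1
      · have hb : (q.1 == p.1) = true := by simpa using hq
        have hn : t.lookup q.1 = none := pv_lookup_eq_none (by simpa [hq] using hk)
        simp [Function.comp, hb, pvResolver, List.lookup, hn]
      · have hb : (q.1 == p.1) = false := by simpa using hq
        simp [Function.comp, hb, pvResolver, List.lookup]
    · rw [pvUpdA, if_neg hin]
      apply List.map_congr_left
      intro q hq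
      have hqk : q.1 ≠ p.1 := by
        intro he
        exact hin (List.any_eq_true.mpr ⟨q, hq, by simp [he]⟩)
      have hb : (q.1 == p.1) = false := by simpa using hqk
      simp [pvResolver, List.lookup, hb]

-- ===== VERDICT (by name: the statement is the Claim_ definition above) =====
theorem normalizar_eventos_iob_spec : Claim_equal_normalizar_eventos_iob := by
  intro e _ hpre
  unfold Spec_normalizar_eventos_iob
  match e with
  | none =>
    simp [normalizar_eventos_iob, normalizar_eventos_iob_alt, pv_construir_eq_map, pvResolver]
  | some xs =>
    simp only [normalizar_eventos_iob, normalizar_eventos_iob_alt]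
    by_cases hx : xs.isEmpty
    · simp [hx, pv_construir_eq_map, pvResolver]
    · simp only [hx, Bool.false_eq_true, if_false]
      rw [pv_construir_eq_map]
      exact pv_foldl_updA xs pvEventosIOB hpre
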